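-- pv_equiv track=rewrite | github.com/exellaz/advent_of_code_2024 | day17/part2.py | find
-- ===== SOURCE A (Python) =====
-- def find(program, ans):
--     if program == []:
--         return ans
--     for x in range(8):
--         a = ans << 3 | x
--         b = a % 8
--         b = b ^ 2
--         c = a >> b
--         b = b ^ c
--         b = b ^ 3
--         if b % 8 == program[-1]:
--             sub = find(program[:-1], a)
--             if sub is None:
--                 continue
--             return sub
-- ===== SOURCE B (Python) =====
-- def _out(a):
--     b = (a % 8) ^ 2
--     return ((b ^ (a >> b)) ^ 3) % 8
--
--
-- def find(program, ans):
--     # Iterative level-by-level frontier expansion (in DFS order) instead of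
--     # recursive backtracking; the first surviving candidate is the answer.
--     frontier = [ans]
--     for d in reversed(program):
--         new = []
--         for a in frontier:
--             for x in range(8):
--                 v = a << 3 | x
--                 if _out(v) == d:
--                     new.append(v)
--         frontier = new
--     return frontier[0] if frontier else None
-- ===== Notes on version B (the rewrite author's own statement) =====
-- stated objective: alternative
-- what changed: Replaces the recursive DFS with backtracking by an iterative level-by-level frontier expansion over the program digits (last to first), returning the first element of the final frontier.
import Mathlib
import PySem

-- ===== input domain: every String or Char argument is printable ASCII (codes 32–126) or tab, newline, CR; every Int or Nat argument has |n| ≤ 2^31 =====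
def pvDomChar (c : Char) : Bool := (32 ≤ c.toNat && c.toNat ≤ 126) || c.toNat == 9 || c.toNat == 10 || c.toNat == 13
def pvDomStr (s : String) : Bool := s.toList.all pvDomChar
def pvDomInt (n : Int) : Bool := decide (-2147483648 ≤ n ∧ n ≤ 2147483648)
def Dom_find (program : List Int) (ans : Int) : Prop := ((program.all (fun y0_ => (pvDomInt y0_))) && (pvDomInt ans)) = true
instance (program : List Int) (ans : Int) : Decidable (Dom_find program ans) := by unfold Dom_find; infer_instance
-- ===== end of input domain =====

-- B replaces A's recursive base-8 DFS backtracking by an iterative level-by-level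
-- frontier expansion over the program digits; objective: alternative (same cost).


-- ===== PORT A =====
-- Mutual recursion: `find` is the Python function, `findLoop` its `for x in range(8)` loop
-- (which `continue`s on a failed recursive call and returns on success).
mutual
def find (program : List Int) (ans : Int) : Option Int :=
  if program = [] then some ans
  else findLoop program ans (PySem.List.pyRange 0 8 1)
termination_by (program.length, 9)

def findLoop (program : List Int) (ans : Int) (xs : List Int) : Option Int :=
  match xs with
  | [] => none
  | x :: rest =>
    let a := PySem.Int.bor (ans <<< (3 : Nat)) x
    let b := PySem.Int.bxor (PySem.Int.mod a 8) 2
    let c := a >>> b.toNat                       -- b ≥ 0 here, so this is Python's a >> b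
    let b2 := PySem.Int.bxor b c
    let b3 := PySem.Int.bxor b2 3
    if PySem.Int.mod b3 8 = (PySem.List.pyGet? program (-1)).getD 0 then
      -- `find` only calls this loop with a nonempty program; the [] branch is an
      -- unreachable totality guard.
      match hp : program with
      | [] => none
      | _q :: _qs =>
        match find program.dropLast a with
        | none => findLoop program ans rest
        | some sub => some sub
    else findLoop program ans rest
termination_by (program.length, xs.length)
decreasing_by
  all_goals try rw [hp]
  all_goals simp
  all_goals omega
end

-- ===== PORT B =====
-- B-side helper: Python's `_out`
def outDigit (a : Int) : Int :=
  let b := PySem.Int.bxor (PySem.Int.mod a 8) 2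
  PySem.Int.mod (PySem.Int.bxor (PySem.Int.bxor b (a >>> b.toNat)) 3) 8

-- one expansion step of the frontier for digit d (the two nested `for` loops)
def stepFn (fr : List Int) (d : Int) : List Int :=
  fr.flatMap (fun (a : Int) =>
    (PySem.List.pyRange 0 8 1).filterMap (fun (x : Int) =>
      let v := PySem.Int.bor (a <<< (3 : Nat)) x
      if outDigit v = d then some v else none))

def find_alt (program : List Int) (ans : Int) : Option Int :=
  (program.reverse.foldl stepFn [ans]).head?

-- ===== PRECONDITION & SPEC =====
def Spec_find (program : List Int) (ans : Int) (out : Option Int) : Prop := out = find_alt program ans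
instance (program : List Int) (ans : Int) (out : Option Int) : Decidable (Spec_find program ans out) := by unfold Spec_find; infer_instance

-- ===== CLAIM (what is proved, stated in full; the proofs are below) =====
def Claim_equal_find : Prop := ∀ (program : List Int) (ans : Int), Dom_find program ans → Spec_find program ans (find program ans)

-- ===== LEMMAS AND PROOFS =====

-- the DFS-ordered list of all successful candidates, recursing over the reversed program
def cands (rev : List Int) (a : Int) : List Int :=
  match rev with
  | [] => [a]
  | d :: rest =>
    (PySem.List.pyRange 0 8 1).flatMap (fun (x : Int) =>
      let v := PySem.Int.bor (a <<< (3 : Nat)) x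
      if outDigit v = d then cands rest v else [])

theorem flatMap_filterMap {α β γ : Type} (l : List α) (h : α → Option β) (g : β → List γ) :
    (l.filterMap h).flatMap g
      = l.flatMap (fun x => match h x with | some v => g v | none => []) := by
  induction l with
  | nil => rfl
  | cons y l ih =>
    cases hy : h y <;> simp [hy, ih]

theorem loop_char (d : Int) (rest : List Int) (ans : Int)
    (IH : ∀ a, find rest.reverse a = (cands rest a).head?) :
    ∀ xs, findLoop (rest.reverse ++ [d]) ans xs
      = (xs.flatMap (fun x =>
          let v := PySem.Int.bor (ans <<< (3 : Nat)) x
          if outDigit v = d then cands rest v else [])).head? := by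
  intro xs
  induction xs with
  | nil => simp [findLoop.eq_def]
  | cons x xs ih =>
    rw [findLoop.eq_def]
    have hget : (PySem.List.pyGet? (rest.reverse ++ [d]) (-1)).getD 0 = d := by
      simp [PySem.List.pyGet?, PySem.List.pyIdx?]
    rw [hget]
    by_cases hc :
        PySem.Int.mod
          (PySem.Int.bxor
            (PySem.Int.bxor (PySem.Int.bxor (PySem.Int.mod (PySem.Int.bor (ans <<< (3:Nat)) x) 8) 2)
              ((PySem.Int.bor (ans <<< (3:Nat)) x) >>>
                (PySem.Int.bxor (PySem.Int.mod (PySem.Int.bor (ans <<< (3:Nat)) x) 8) 2).toNat)) 3) 8 = d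
    · have hout : outDigit (PySem.Int.bor (ans <<< (3:Nat)) x) = d := by
        simpa [outDigit] using hc
      have hdrop : (rest.reverse ++ [d]).dropLast = rest.reverse := by
        simp
      simp only [hc, if_pos, hdrop]
      rw [IH]
      cases hcs : cands rest (PySem.Int.bor (ans <<< (3:Nat)) x) with
      | nil =>
        simp [hcs, hout, ih]
        split <;> simp_all
      | cons v vs =>
        simp [hcs, hout]
        split <;> simp_all
    · have hout : ¬ outDigit (PySem.Int.bor (ans <<< (3:Nat)) x) = d := by
        simpa [outDigit] using hc
      simp only [hc, if_neg, not_false_iff]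
      simp [hout, ih]

theorem find_char : ∀ (rev : List Int) (a : Int), find rev.reverse a = (cands rev a).head? := by
  intro rev
  induction rev with
  | nil => intro a; simp [find.eq_def, cands]
  | cons d rest ih =>
    intro a
    rw [find.eq_def]
    have hne : rest.reverse ++ [d] ≠ [] := by simp
    simp only [List.reverse_cons, hne, if_neg, not_false_iff]
    rw [loop_char d rest a ih]
    rfl

theorem foldl_char : ∀ (rev L : List Int), rev.foldl stepFn L = L.flatMap (cands rev) := by
  intro rev
  induction rev with
  | nil => intro L; simp [cands]
  | cons d rest ih =>
    intro L
    rw [List.foldl_cons, ih]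
    show (stepFn L d).flatMap (cands rest) = L.flatMap (cands (d :: rest))
    unfold stepFn
    rw [List.flatMap_assoc]
    apply List.flatMap_congr
    intro a _
    rw [flatMap_filterMap]
    apply List.flatMap_congr
    intro x _
    by_cases h : outDigit (PySem.Int.bor (a <<< (3:Nat)) x) = d <;> simp [h]

-- ===== VERDICT (by name: the statement is the Claim_ definition above) =====
theorem find_spec : Claim_equal_find := by
  intro program ans _
  unfold Spec_find find_alt
  rw [foldl_char]
  have := find_char program.reverse ans
  rw [List.reverse_reverse] at this
  simp [this]
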